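-- pv_equiv track=rewrite | github.com/Ankit-kumar516/DSA_PROBLEM_SOLVING | Streak Star.py | findMaxStreak
-- ===== SOURCE A (Python) =====
-- def findMaxStreak(N, X, A):
--     maxStreak = 1
--     curStreak = 1
--
--     for i in range(1, N):
--         if A[i] >= A[i - 1]:
--             curStreak += 1
--             maxStreak = max(maxStreak, curStreak)
--         else:
--             curStreak = 1
--
--     bestStreak = maxStreak
--
--     for i in range(N):
--         modA = A[:]
--         modA[i] *= X
--
--         maxStreak = 1
--         curStreak = 1
--
--         for j in range(1, N):
--             if modA[j] >= modA[j - 1]: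
--                 curStreak += 1
--                 maxStreak = max(maxStreak, curStreak)
--             else:
--                 curStreak = 1
--
--         bestStreak = max(bestStreak, maxStreak)
--
--     return bestStreak
-- ===== SOURCE B (Python) =====
-- def findMaxStreak(N, X, A):
--     # Prefix/suffix non-decreasing run lengths; each modified index evaluated in O(1).
--     if N <= 0:
--         return 1
--     pre = [1]
--     for i in range(1, N):
--         pre.append(pre[-1] + 1 if A[i] >= A[i - 1] else 1)
--     suf = [1]
--     for i in range(N - 2, -1, -1):
--         suf.append(suf[-1] + 1 if A[i] <= A[i + 1] else 1)
--     suf.reverse()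
--     best = max(pre)
--     for i in range(N):
--         v = A[i] * X
--         c = 1
--         if i > 0 and A[i - 1] <= v:
--             c += pre[i - 1]
--         if i + 1 < N and v <= A[i + 1]:
--             c += suf[i + 1]
--         best = max(best, c)
--     return best
-- ===== Notes on version B (the rewrite author's own statement) =====
-- stated objective: faster
-- what changed: Instead of re-scanning the whole array for every modified index (O(N^2)), B precomputes prefix and suffix non-decreasing run lengths once and evaluates each multiplied index in O(1).
import Mathlib
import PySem

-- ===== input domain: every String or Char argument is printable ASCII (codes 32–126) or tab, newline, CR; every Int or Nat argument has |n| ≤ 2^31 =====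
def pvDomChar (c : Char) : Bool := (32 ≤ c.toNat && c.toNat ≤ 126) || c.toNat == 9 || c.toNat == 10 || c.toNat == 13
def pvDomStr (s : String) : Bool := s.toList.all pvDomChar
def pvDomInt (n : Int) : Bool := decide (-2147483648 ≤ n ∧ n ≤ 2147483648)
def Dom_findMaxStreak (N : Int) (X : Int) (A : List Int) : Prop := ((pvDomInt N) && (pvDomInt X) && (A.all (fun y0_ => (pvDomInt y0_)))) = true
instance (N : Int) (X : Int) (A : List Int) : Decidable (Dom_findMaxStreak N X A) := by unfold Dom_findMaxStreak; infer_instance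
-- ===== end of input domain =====

-- B replaces A's per-index full rescan (O(N^2)) by prefix/suffix run lengths computed once (O(N)).

-- ===== PORT A =====
-- literal port of A: first scan, then for each i copy-with-modification and rescan.
def findMaxStreak (N : Int) (X : Int) (A : List Int) : Int :=
  let s1 := (PySem.List.pyRange 1 N 1).foldl
    (fun (p : Int × Int) i =>
      if PySem.List.pyGetD A i 0 ≥ PySem.List.pyGetD A (i - 1) 0 then
        (max p.1 (p.2 + 1), p.2 + 1)
      else (p.1, 1)) (1, 1)
  (PySem.List.pyRange 0 N 1).foldl
    (fun best i =>
      let modA := PySem.List.pySetD A i (PySem.List.pyGetD A i 0 * X)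
      let s2 := (PySem.List.pyRange 1 N 1).foldl
        (fun (p : Int × Int) j =>
          if PySem.List.pyGetD modA j 0 ≥ PySem.List.pyGetD modA (j - 1) 0 then
            (max p.1 (p.2 + 1), p.2 + 1)
          else (p.1, 1)) (1, 1)
      max best s2.1) s1.1

-- ===== PORT B =====
-- literal port of Source B: pre/suf run-length lists built once, then one O(1) evaluation per index.
def findMaxStreak_alt (N : Int) (X : Int) (A : List Int) : Int :=
  if N ≤ 0 then 1
  else
    let pre := (PySem.List.pyRange 1 N 1).foldl
      (fun q i => q ++ [if PySem.List.pyGetD A i 0 ≥ PySem.List.pyGetD A (i - 1) 0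
                        then PySem.List.pyGetD q (-1) 0 + 1 else 1]) [(1 : Int)]
    let suf := ((PySem.List.pyRange (N - 2) (-1) (-1)).foldl
      (fun q i => q ++ [if PySem.List.pyGetD A i 0 ≤ PySem.List.pyGetD A (i + 1) 0
                        then PySem.List.pyGetD q (-1) 0 + 1 else 1]) [(1 : Int)]).reverse
    let best0 := (PySem.List.max? pre (fun x => x)).getD 0
    (PySem.List.pyRange 0 N 1).foldl
      (fun best i =>
        let v := PySem.List.pyGetD A i 0 * X
        let c : Int := 1
        let c := if 0 < i ∧ PySem.List.pyGetD A (i - 1) 0 ≤ v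
                 then c + PySem.List.pyGetD pre (i - 1) 0 else c
        let c := if i + 1 < N ∧ v ≤ PySem.List.pyGetD A (i + 1) 0
                 then c + PySem.List.pyGetD suf (i + 1) 0 else c
        max best c) best0

-- ===== PRECONDITION & SPEC =====
-- Pre_ excludes exactly the inputs where A raises IndexError: indices up to N-1 are read, so N must not exceed len(A).
def Pre_findMaxStreak (N : Int) (X : Int) (A : List Int) : Prop := N ≤ (A.length : Int)
instance (N : Int) (X : Int) (A : List Int) : Decidable (Pre_findMaxStreak N X A) := by
  unfold Pre_findMaxStreak; infer_instance

def pvWitness_findMaxStreak : Int × Int × List Int := (3, 2, [1, 5, 2])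

def Spec_findMaxStreak (N : Int) (X : Int) (A : List Int) (out : Int) : Prop := out = findMaxStreak_alt N X A
instance (N : Int) (X : Int) (A : List Int) (out : Int) : Decidable (Spec_findMaxStreak N X A out) := by unfold Spec_findMaxStreak; infer_instance

-- ===== CLAIM (what is proved, stated in full; the proofs are below) =====
def Claim_equal_findMaxStreak : Prop := ∀ (N : Int) (X : Int) (A : List Int), Dom_findMaxStreak N X A → Pre_findMaxStreak N X A → Spec_findMaxStreak N X A (findMaxStreak N X A)

-- ===== LEMMAS AND PROOFS =====

-- ---- clean (index-function) layer ----

/-- length of the maximal non-decreasing run of `g` ending at index `j`. -/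
def preF (g : Nat → Int) : Nat → Nat
  | 0 => 1
  | j + 1 => if g j ≤ g (j + 1) then preF g j + 1 else 1

/-- length of the maximal non-decreasing run of `g` (within `[0,n)`) starting at `j`. -/
def sufF (g : Nat → Int) (n j : Nat) : Nat :=
  if h : j + 1 < n then (if g j ≤ g (j + 1) then sufF g n (j + 1) + 1 else 1) else 1
termination_by n - j

/-- max streak over the first `n` entries (1 when `n = 0`), as max of run-end lengths. -/
def MPN (g : Nat → Int) (n : Nat) : Nat :=
  (List.range n).foldl (fun a j => max a (preF g j)) 1

/-- modified index function: entry `i` multiplied by `X`. -/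
def modF (g : Nat → Int) (X : Int) (i : Nat) : Nat → Int :=
  fun k => if k = i then g i * X else g k

/-- the O(1) candidate B evaluates at index `i`. -/
def candN (g : Nat → Int) (X : Int) (n i : Nat) : Nat :=
  (if 0 < i ∧ g (i - 1) ≤ g i * X then preF g (i - 1) else 0) + 1 +
  (if i + 1 < n ∧ g i * X ≤ g (i + 1) then sufF g n (i + 1) else 0)

lemma one_le_preF (g : Nat → Int) (j : Nat) : 1 ≤ preF g j := by
  cases j with
  | zero => simp [preF]
  | succ j => simp only [preF]; split <;> omega

lemma one_le_sufF (g : Nat → Int) (n j : Nat) : 1 ≤ sufF g n j := by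
  unfold sufF; split <;> [skip; omega]
  split <;> omega

lemma MPN_succ (g : Nat → Int) (n : Nat) :
    MPN g (n + 1) = max (MPN g n) (preF g n) := by
  simp [MPN, List.range_succ]

lemma one_le_MPN (g : Nat → Int) (n : Nat) : 1 ≤ MPN g n := by
  induction n with
  | zero => simp [MPN]
  | succ n ih => rw [MPN_succ]; omega

lemma preF_le_MPN (g : Nat → Int) {n j : Nat} (h : j < n) : preF g j ≤ MPN g n := by
  induction n with
  | zero => omega
  | succ n ih =>
    rw [MPN_succ]
    rcases Nat.lt_succ_iff_lt_or_eq.mp h with h' | h'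
    · exact le_trans (ih h') (le_max_left _ _)
    · subst h'; exact le_max_right _ _

lemma MPN_le (g : Nat → Int) {n x : Nat} (h1 : 1 ≤ x) (h : ∀ j < n, preF g j ≤ x) :
    MPN g n ≤ x := by
  induction n with
  | zero => simpa [MPN]
  | succ n ih =>
    rw [MPN_succ]
    exact max_le (ih (fun j hj => h j (by omega))) (h n (by omega))

lemma preF_congr {g1 g2 : Nat → Int} {j : Nat} (h : ∀ k ≤ j, g1 k = g2 k) :
    preF g1 j = preF g2 j := by
  induction j with
  | zero => simp [preF]
  | succ j ih =>
    simp only [preF, h j (by omega), h (j+1) (by omega),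
      ih (fun k hk => h k (by omega))]

lemma preF_le (g : Nat → Int) (j : Nat) : preF g j ≤ j + 1 := by
  induction j with
  | zero => simp [preF]
  | succ j ih => simp only [preF]; split <;> omega

/-- the run ending at `j` really is non-decreasing. -/
lemma preF_good (g : Nat → Int) (j : Nat) :
    ∀ k, k < j → j < k + preF g j → g k ≤ g (k + 1) := by
  induction j with
  | zero => omega
  | succ j ih =>
    intro k hk hkp
    simp only [preF] at hkp
    split at hkp
    · rcases Nat.lt_succ_iff_lt_or_eq.mp hk with h' | h'
      · exact ih k h' (by omega)
      · subst h'; assumption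
    · omega

lemma preF_ge_of_good (g : Nat → Int) {s j : Nat} (hsj : s ≤ j)
    (h : ∀ k, s ≤ k → k < j → g k ≤ g (k + 1)) : j - s + 1 ≤ preF g j := by
  induction j with
  | zero => simp [preF]
  | succ j ih =>
    rcases Nat.eq_or_lt_of_le hsj with h' | h'
    · have h1 := one_le_preF g (j + 1); omega
    · have hj : s ≤ j := by omega
      have := ih hj (fun k hk1 hk2 => h k hk1 (by omega))
      simp only [preF, h j hj (by omega), if_pos]
      omega

lemma sufF_bound (g : Nat → Int) {n j : Nat} (h : j < n) : j + sufF g n j ≤ n := by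
  have H : ∀ m j, n - j = m → j < n → j + sufF g n j ≤ n := by
    intro m
    induction m with
    | zero => intro j h1 h2; omega
    | succ m ih =>
      intro j h1 h2
      unfold sufF
      split
      · split
        · have := ih (j + 1) (by omega) (by omega); omega
        · omega
      · omega
  exact H (n - j) j rfl h

lemma sufF_good (g : Nat → Int) (n : Nat) :
    ∀ j k, j ≤ k → k + 1 < j + sufF g n j → g k ≤ g (k + 1) := by
  intro j
  have H : ∀ m j, n - j = m → ∀ k, j ≤ k → k + 1 < j + sufF g n j → g k ≤ g (k + 1) := by
    intro m
    induction m with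
    | zero =>
      intro j h1 k hk1 hk2
      unfold sufF at hk2
      split at hk2
      · omega
      · omega
    | succ m ih =>
      intro j h1 k hk1 hk2
      unfold sufF at hk2
      split at hk2
      · split at hk2
        · rcases Nat.eq_or_lt_of_le hk1 with h' | h'
          · subst h'; assumption
          · exact ih (j + 1) (by omega) k (by omega) (by omega)
        · omega
      · omega
  exact H (n - j) j rfl

lemma sufF_ge_of_good (g : Nat → Int) {n j m : Nat} (hjm : j ≤ m) (hm : m < n)
    (h : ∀ k, j ≤ k → k < m → g k ≤ g (k + 1)) : m + 1 - j ≤ sufF g n j := by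
  have H : ∀ d j, m - j = d → j ≤ m →
      (∀ k, j ≤ k → k < m → g k ≤ g (k + 1)) → m + 1 - j ≤ sufF g n j := by
    intro d
    induction d with
    | zero =>
      intro j h1 h2 h3
      have := one_le_sufF g n j; omega
    | succ d ih =>
      intro j h1 h2 h3
      have hlt : j + 1 < n := by omega
      have hg : g j ≤ g (j + 1) := h3 j (by omega) (by omega)
      have := ih (j + 1) (by omega) (by omega) (fun k hk1 hk2 => h3 k (by omega) hk2)
      unfold sufF
      rw [dif_pos hlt, if_pos hg]
      omega
  exact H (m - j) j rfl hjm h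

-- ---- the key per-index lemma ----

lemma preF_modF_lt (g : Nat → Int) (X : Int) (i : Nat) {j : Nat} (h : j < i) :
    preF (modF g X i) j = preF g j := by
  exact preF_congr (fun k hk => by simp [modF]; intro h'; omega)

lemma preF_modF_self (g : Nat → Int) (X : Int) (i : Nat) :
    preF (modF g X i) i =
      (if 0 < i ∧ g (i - 1) ≤ g i * X then preF g (i - 1) else 0) + 1 := by
  cases i with
  | zero => simp [preF]
  | succ i =>
    have h1 : modF g X (i + 1) i = g i := by simp [modF]
    have h2 : modF g X (i + 1) (i + 1) = g (i + 1) * X := by simp [modF]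
    simp only [preF, h1, h2, preF_modF_lt g X (i + 1) (Nat.lt_succ_self i)]
    by_cases h : g i ≤ g (i + 1) * X <;>
      simp [h, Nat.add_sub_cancel]

-- B's candidate is realised in the modified array.
lemma cand_le_MPN_mod (g : Nat → Int) (X : Int) {n i : Nat} (hi : i < n) :
    candN g X n i ≤ MPN (modF g X i) n := by
  set M := modF g X i with hM
  by_cases hr : i + 1 < n ∧ g i * X ≤ g (i + 1)
  · set s := sufF g n (i + 1) with hs
    have hs1 : 1 ≤ s := one_le_sufF g n (i + 1)
    have hsb : i + 1 + s ≤ n := sufF_bound g hr.1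
    have step : ∀ r, r ≤ s → preF M (i + r) = preF M i + r := by
      intro r hr'
      induction r with
      | zero => simp
      | succ r ih =>
        have hle : M (i + r) ≤ M (i + r + 1) := by
          cases Nat.eq_zero_or_pos r with
          | inl h0 =>
            subst h0
            have : M i = g i * X := by simp [hM, modF]
            have h2 : M (i + 1) = g (i + 1) := by simp [hM, modF]
            rw [show i + 0 = i from rfl, this, h2]
            exact hr.2
          | inr hpos =>
            have e1 : M (i + r) = g (i + r) := by simp [hM, modF]; omega
            have e2 : M (i + r + 1) = g (i + r + 1) := by simp [hM, modF]; omega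
            rw [e1, e2]
            exact sufF_good g n (i + 1) (i + r) (by omega) (by omega)
        have : preF M (i + r + 1) = preF M (i + r) + 1 := by
          simp only [preF, hle, if_pos]
        rw [show i + (r + 1) = i + r + 1 from rfl, this, ih (by omega)]
        omega
    have hcand : candN g X n i = preF M i + s := by
      rw [candN, if_pos hr, preF_modF_self g X i, hs]
    rw [hcand, ← step s (le_refl s)]
    exact preF_le_MPN M (by omega)
  · have hcand : candN g X n i = preF M i := by
      rw [candN, if_neg hr, preF_modF_self g X i]
    rw [hcand]
    exact preF_le_MPN M hi

-- every run-end in the modified array is bounded by the old best or B's candidate.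
lemma preF_mod_le (g : Nat → Int) (X : Int) {n i j : Nat} (hi : i < n) (hj : j < n) :
    preF (modF g X i) j ≤ max (MPN g n) (candN g X n i) := by
  set M := modF g X i with hM
  rcases lt_trichotomy j i with h | h | h
  · rw [preF_modF_lt g X i h]
    exact le_trans (preF_le_MPN g hj) (le_max_left _ _)
  · subst h
    refine le_trans ?_ (le_max_right _ _)
    rw [preF_modF_self g X j, candN]
    omega
  · -- j > i
    set t := preF M j with ht
    have htle : t ≤ j + 1 := preF_le M j
    have hgood : ∀ k, k < j → j < k + t → M k ≤ M (k + 1) := preF_good M j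
    by_cases hcase : j < i + t
    · -- the run crosses index i
      have hv : g i * X ≤ g (i + 1) := by
        have := hgood i h (by omega)
        simpa [hM, modF] using this
      have hrcond : i + 1 < n ∧ g i * X ≤ g (i + 1) := ⟨by omega, hv⟩
      have hsuf : j - i ≤ sufF g n (i + 1) := by
        have := sufF_ge_of_good g (n := n) (j := i + 1) (m := j) (by omega) hj
          (fun k hk1 hk2 => by
            have := hgood k (by omega) (by omega)
            simpa [hM, modF, show k ≠ i by omega, show k + 1 ≠ i by omega] using this)
        omega
      refine le_trans ?_ (le_max_right _ _)
      rw [candN, if_pos hrcond]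
      by_cases hleft : j + 1 < i + t
      · -- the comparison at i-1 is inside the run, so the left condition holds
        have hipos : 0 < i := by omega
        have hgl : g (i - 1) ≤ g i * X := by
          have := hgood (i - 1) (by omega) (by omega)
          simpa [hM, modF, show i - 1 ≠ i by omega, show i - 1 + 1 = i by omega] using this
        have hpre : i + t - j - 1 ≤ preF g (i - 1) := by
          have := preF_ge_of_good g (s := j + 1 - t) (j := i - 1) (by omega)
            (fun k hk1 hk2 => by
              have := hgood k (by omega) (by omega)
              simpa [hM, modF, show k ≠ i by omega, show k + 1 ≠ i by omega] using this)
          omega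
        rw [if_pos ⟨hipos, hgl⟩]
        omega
      · -- t = j + 1 - i : the run starts exactly at i
        omega
    · -- the run lies strictly right of i : it is a run of g
      have : t ≤ preF g j := by
        rcases Nat.eq_zero_or_pos t with h0 | hpos
        · omega
        · have := preF_ge_of_good g (s := j + 1 - t) (j := j) (by omega)
            (fun k hk1 hk2 => by
              have := hgood k (by omega) (by omega)
              simpa [hM, modF, show k ≠ i by omega, show k + 1 ≠ i by omega] using this)
          omega
      exact le_trans (le_trans this (preF_le_MPN g hj)) (le_max_left _ _)

lemma key_lemma (g : Nat → Int) (X : Int) {n i : Nat} (hi : i < n) :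
    max (MPN g n) (MPN (modF g X i) n) = max (MPN g n) (candN g X n i) := by
  apply le_antisymm
  · apply max_le (le_max_left _ _)
    apply le_trans (MPN_le (modF g X i) (by have := one_le_MPN g n; omega)
      (fun j hj => preF_mod_le g X hi hj))
    omega
  · exact max_le (le_max_left _ _)
      (le_trans (cand_le_MPN_mod g X hi) (le_max_right _ _))

-- ---- Int scan layer (relates the A-style scan to MPN) ----

def scanStep (g : Nat → Int) (p : Int × Int) (k : Nat) : Int × Int :=
  if g k ≤ g (k + 1) then (max p.1 (p.2 + 1), p.2 + 1) else (p.1, 1)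

lemma scan_eq (g : Nat → Int) (m : Nat) :
    (List.range m).foldl (scanStep g) (1, 1) =
      ((MPN g (m + 1) : Int), (preF g m : Int)) := by
  induction m with
  | zero => simp [MPN, List.range_succ, preF]
  | succ m ih =>
    rw [List.range_succ, List.foldl_append, ih]
    simp only [List.foldl_cons, List.foldl_nil, scanStep]
    by_cases h : g m ≤ g (m + 1)
    · rw [if_pos h, Prod.mk.injEq]
      simp only [MPN_succ, preF, h, if_pos, Nat.cast_max]
      constructor <;> push_cast <;> ring_nf
    · rw [if_neg h, Prod.mk.injEq]
      have h1 : (1 : Int) ≤ (preF g m : Int) := by exact_mod_cast one_le_preF g m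
      simp [MPN_succ, preF, h, Nat.cast_max, max_eq_left h1]

-- ---- generic fold/max helpers ----

lemma max_cancel {b x y acc : Int} (h : max b x = max b y) (hb : b ≤ acc) :
    max acc x = max acc y := by
  rcases max_cases b x with ⟨e1, l1⟩ | ⟨e1, l1⟩ <;>
    rcases max_cases b y with ⟨e2, l2⟩ | ⟨e2, l2⟩ <;>
      rcases max_cases acc x with ⟨e3, l3⟩ | ⟨e3, l3⟩ <;>
        rcases max_cases acc y with ⟨e4, l4⟩ | ⟨e4, l4⟩ <;> omega

lemma fold_max_eq {b : Int} (f1 f2 : Nat → Int) :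
    ∀ (l : List Nat) (acc : Int), (∀ k ∈ l, max b (f1 k) = max b (f2 k)) → b ≤ acc →
      l.foldl (fun a k => max a (f1 k)) acc = l.foldl (fun a k => max a (f2 k)) acc := by
  intro l
  induction l with
  | nil => intro acc _ _; rfl
  | cons hd tl ih =>
    intro acc h hb
    simp only [List.foldl_cons]
    rw [max_cancel (h hd (by simp)) hb]
    exact ih _ (fun k hk => h k (by simp [hk])) (le_trans hb (le_max_left _ _))

lemma castMax_fold (l : List Nat) (f : Nat → Nat) (b : Nat) :
    ((l.foldl (fun a j => max a (f j)) b : Nat) : Int) =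
      l.foldl (fun a j => max a ((f j : Nat) : Int)) (b : Int) := by
  induction l generalizing b with
  | nil => rfl
  | cons hd tl ih => simp only [List.foldl_cons, ih, Nat.cast_max]

lemma MPN_congr {g1 g2 : Nat → Int} {n : Nat} (h : ∀ j < n, g1 j = g2 j) :
    MPN g1 n = MPN g2 n := by
  induction n with
  | zero => rfl
  | succ n ih =>
    rw [MPN_succ, MPN_succ, ih (fun j hj => h j (by omega)),
      preF_congr (fun k hk => h k (by omega))]

lemma reverse_map_range (n : Nat) (f : Nat → Int) :
    ((List.range n).map f).reverse = (List.range n).map (fun t => f (n - 1 - t)) := by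
  apply List.ext_getElem
  · simp
  · intro i h1 h2
    simp only [List.getElem_reverse, List.getElem_map, List.getElem_range,
      List.length_map, List.length_range, List.length_reverse] at h1 h2 ⊢

-- ---- bridging the A port to the clean layer ----

lemma innerA (B : List Int) (N : Int) :
    ((PySem.List.pyRange 1 N 1).foldl
      (fun (p : Int × Int) j =>
        if PySem.List.pyGetD B j 0 ≥ PySem.List.pyGetD B (j - 1) 0 then
          (max p.1 (p.2 + 1), p.2 + 1)
        else (p.1, 1)) (1, 1))
    = (List.range (N - 1).toNat).foldl (scanStep (fun k => B.getD k 0)) (1, 1) := by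
  rw [PySem.List.pyRange_one, List.foldl_map]
  apply PySem.List.foldl_congr_mem
  intro p k _
  have e2 : (1 : Int) + (k : Int) - 1 = ((k : Nat) : Int) := by push_cast; ring
  have e1 : (1 : Int) + (k : Int) = ((k + 1 : Nat) : Int) := by push_cast; ring
  rw [e2, e1, PySem.List.pyGetD_natCast, PySem.List.pyGetD_natCast]
  simp [scanStep, ge_iff_le]

lemma portA_eq (N X : Int) (A : List Int) (hN : 0 < N) (hPre : N ≤ (A.length : Int)) :
    findMaxStreak N X A =
      (List.range N.toNat).foldl
        (fun acc k => max acc ((MPN (modF (fun j => A.getD j 0) X k) N.toNat : Nat) : Int))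
        ((MPN (fun j => A.getD j 0) N.toNat : Int)) := by
  have hn1 : (N - 1).toNat + 1 = N.toNat := by omega
  unfold findMaxStreak
  simp only [innerA, scan_eq, hn1]
  rw [PySem.List.pyRange_one 0 N, List.foldl_map]
  simp only [sub_zero, zero_add]
  apply PySem.List.foldl_congr_mem
  intro acc k hk
  have hkn : k < N.toNat := List.mem_range.mp hk
  congr 1
  rw [PySem.List.pyGetD_natCast, PySem.List.pySetD_natCast]
  congr 1
  apply MPN_congr
  intro j hj
  have hkA : k < A.length := by omega
  have hjA : j < A.length := by omega
  by_cases hjk : j = k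
  · subst hjk
    simp [List.getD_eq_getElem?_getD, List.getElem?_set, hjA, modF]
  · simp [List.getD_eq_getElem?_getD, List.getElem?_set, Ne.symm hjk, hjk, modF]

-- ---- bridging the B port to the clean layer ----

lemma preListA (A : List Int) (N : Int) :
    (PySem.List.pyRange 1 N 1).foldl
      (fun q i => q ++ [if PySem.List.pyGetD A i 0 ≥ PySem.List.pyGetD A (i - 1) 0
                        then PySem.List.pyGetD q (-1) 0 + 1 else 1]) [(1 : Int)]
    = (List.range ((N - 1).toNat + 1)).map
        (fun t => (preF (fun k => A.getD k 0) t : Int)) := by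
  rw [PySem.List.pyRange_one, List.foldl_map]
  generalize (N - 1).toNat = m
  induction m with
  | zero => simp [preF]
  | succ m ih =>
    rw [List.range_succ, List.foldl_append, ih]
    simp only [List.foldl_cons, List.foldl_nil]
    have e2 : (1 : Int) + (m : Int) - 1 = ((m : Nat) : Int) := by push_cast; ring
    have e1 : (1 : Int) + (m : Int) = ((m + 1 : Nat) : Int) := by push_cast; ring
    rw [e2, e1, PySem.List.pyGetD_natCast, PySem.List.pyGetD_natCast]
    have hq : PySem.List.pyGetD
        ((List.range (m + 1)).map (fun t => (preF (fun k => A.getD k 0) t : Int))) (-1) 0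
        = (preF (fun k => A.getD k 0) m : Int) := by
      rw [List.range_succ, List.map_append]
      exact PySem.List.pyGetD_neg_one_append_singleton _ _ _
    rw [hq]
    have hr : (List.range (m + 1 + 1)).map (fun t => (preF (fun k => A.getD k 0) t : Int))
        = (List.range (m + 1)).map (fun t => (preF (fun k => A.getD k 0) t : Int))
          ++ [(preF (fun k => A.getD k 0) (m + 1) : Int)] := by
      rw [List.range_succ, List.map_append]; rfl
    rw [hr]
    congr 1
    by_cases h : A.getD m 0 ≤ A.getD (m + 1) 0
    · simp [preF, h, ge_iff_le]
    · simp [preF, h, ge_iff_le]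

lemma sufListA (N : Int) (A : List Int) (hN : 0 < N) :
    (PySem.List.pyRange (N - 2) (-1) (-1)).foldl
      (fun q i => q ++ [if PySem.List.pyGetD A i 0 ≤ PySem.List.pyGetD A (i + 1) 0
                        then PySem.List.pyGetD q (-1) 0 + 1 else 1]) [(1 : Int)]
    = (List.range N.toNat).map
        (fun t => (sufF (fun k => A.getD k 0) N.toNat (N.toNat - 1 - t) : Int)) := by
  rw [PySem.List.pyRange_neg_one, List.foldl_map]
  have hlen : (N - 2 - -1).toNat = N.toNat - 1 := by omega
  rw [hlen]
  have key : ∀ m, m ≤ N.toNat - 1 →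
      (List.range m).foldl
        (fun q (t : Nat) => q ++ [if PySem.List.pyGetD A ((N - 2) - (t : Int)) 0
                             ≤ PySem.List.pyGetD A ((N - 2) - (t : Int) + 1) 0
                          then PySem.List.pyGetD q (-1) 0 + 1 else 1]) [(1 : Int)]
      = (List.range (m + 1)).map
          (fun t => (sufF (fun k => A.getD k 0) N.toNat (N.toNat - 1 - t) : Int)) := by
    intro m hm
    induction m with
    | zero =>
      have h1 : sufF (fun k => A.getD k 0) N.toNat (N.toNat - 1 - 0) = 1 := by
        unfold sufF; rw [dif_neg (by omega)]
      simp only [List.range_zero, List.foldl_nil, Nat.zero_add, List.range_one,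
        List.map_cons, List.map_nil, h1, Nat.cast_one]
    | succ m ih =>
      rw [List.range_succ, List.foldl_append, ih (by omega)]
      simp only [List.foldl_cons, List.foldl_nil]
      have hi1 : (N - 2) - (m : Int) + 1 = ((N.toNat - 1 - m : Nat) : Int) := by omega
      have hi : (N - 2) - (m : Int) = ((N.toNat - 2 - m : Nat) : Int) := by omega
      rw [hi1, hi, PySem.List.pyGetD_natCast, PySem.List.pyGetD_natCast]
      have hq : PySem.List.pyGetD
          ((List.range (m + 1)).map
            (fun t => (sufF (fun k => A.getD k 0) N.toNat (N.toNat - 1 - t) : Int))) (-1) 0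
          = (sufF (fun k => A.getD k 0) N.toNat (N.toNat - 1 - m) : Int) := by
        rw [List.range_succ]
        simp [PySem.List.pyGetD_neg_one_append_singleton]
      rw [hq]
      have hr : (List.range (m + 1 + 1)).map
            (fun t => (sufF (fun k => A.getD k 0) N.toNat (N.toNat - 1 - t) : Int))
          = (List.range (m + 1)).map
              (fun t => (sufF (fun k => A.getD k 0) N.toNat (N.toNat - 1 - t) : Int))
            ++ [(sufF (fun k => A.getD k 0) N.toNat (N.toNat - 1 - (m + 1)) : Int)] := by
        rw [List.range_succ]
        simp
      rw [hr]
      congr 1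
      have hj : N.toNat - 1 - (m + 1) = N.toNat - 2 - m := by omega
      have hj1 : N.toNat - 2 - m + 1 = N.toNat - 1 - m := by omega
      have hstep : sufF (fun k => A.getD k 0) N.toNat (N.toNat - 2 - m)
          = if A.getD (N.toNat - 2 - m) 0 ≤ A.getD (N.toNat - 1 - m) 0
            then sufF (fun k => A.getD k 0) N.toNat (N.toNat - 1 - m) + 1 else 1 := by
        conv_lhs => rw [sufF.eq_def]
        rw [dif_pos (by omega)]
        simp only [hj1]
      rw [hj, hstep]
      by_cases h : A.getD (N.toNat - 2 - m) 0 ≤ A.getD (N.toNat - 1 - m) 0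
      · rw [if_pos h, if_pos h]; push_cast; ring
      · rw [if_neg h, if_neg h]; rfl
  have h := key (N.toNat - 1) (le_refl _)
  rw [show N.toNat - 1 + 1 = N.toNat from by omega] at h
  exact h

lemma bestA (g : Nat → Int) (n : Nat) (hn : 0 < n) :
    (PySem.List.max? ((List.range n).map (fun t => (preF g t : Int))) (fun x => x)).getD 0
      = (MPN g n : Int) := by
  obtain ⟨m, rfl⟩ : ∃ m, n = m + 1 := ⟨n - 1, by omega⟩
  rw [List.range_succ_eq_map, List.map_cons, List.map_map,
    PySem.List.max?_id_cons, Option.getD_some]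
  unfold MPN
  rw [castMax_fold, List.range_succ_eq_map, List.foldl_cons, List.foldl_map,
    List.foldl_map]
  norm_num [preF, Function.comp]

lemma portB_eq (N X : Int) (A : List Int) (hN : 0 < N) :
    findMaxStreak_alt N X A =
      (List.range N.toNat).foldl
        (fun acc k => max acc ((candN (fun j => A.getD j 0) X N.toNat k : Nat) : Int))
        ((MPN (fun j => A.getD j 0) N.toNat : Int)) := by
  have hn1 : (N - 1).toNat + 1 = N.toNat := by omega
  have hn0 : 0 < N.toNat := by omega
  have hsuf : ((PySem.List.pyRange (N - 2) (-1) (-1)).foldl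
      (fun q i => q ++ [if PySem.List.pyGetD A i 0 ≤ PySem.List.pyGetD A (i + 1) 0
                        then PySem.List.pyGetD q (-1) 0 + 1 else 1]) [(1 : Int)]).reverse
      = (List.range N.toNat).map (fun t => (sufF (fun k => A.getD k 0) N.toNat t : Int)) := by
    rw [sufListA N A hN, reverse_map_range]
    apply List.map_congr_left
    intro t ht
    have ht' : t < N.toNat := List.mem_range.mp ht
    have e : N.toNat - 1 - (N.toNat - 1 - t) = t := by omega
    rw [e]
  unfold findMaxStreak_alt
  rw [if_neg (by omega)]
  simp only [preListA, hsuf, hn1, bestA (fun k => A.getD k 0) N.toNat hn0]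
  rw [PySem.List.pyRange_one 0 N, List.foldl_map]
  simp only [sub_zero, zero_add]
  apply PySem.List.foldl_congr_mem
  intro acc k hk
  have hkn : k < N.toNat := List.mem_range.mp hk
  simp only [PySem.List.pyGetD_natCast]
  congr 1
  have hc1 : (0 < (k : Int) ∧ PySem.List.pyGetD A ((k : Int) - 1) 0 ≤ A.getD k 0 * X)
      ↔ (0 < k ∧ A.getD (k - 1) 0 ≤ A.getD k 0 * X) := by
    by_cases hk0 : 0 < k
    · have ek1 : ((k : Int) - 1) = ((k - 1 : Nat) : Int) := by omega
      rw [ek1, PySem.List.pyGetD_natCast]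
      constructor
      · rintro ⟨_, h⟩; exact ⟨hk0, h⟩
      · rintro ⟨_, h⟩; exact ⟨by exact_mod_cast hk0, h⟩
    · constructor
      · rintro ⟨h, _⟩; exact absurd (by exact_mod_cast h) hk0
      · rintro ⟨h, _⟩; exact absurd h hk0
  have ek2 : ((k : Int) + 1) = ((k + 1 : Nat) : Int) := by push_cast; ring
  have hc2 : ((k : Int) + 1 < N ∧ A.getD k 0 * X ≤ PySem.List.pyGetD A ((k : Int) + 1) 0)
      ↔ (k + 1 < N.toNat ∧ A.getD k 0 * X ≤ A.getD (k + 1) 0) := by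
    rw [ek2, PySem.List.pyGetD_natCast]
    constructor
    · rintro ⟨h, h'⟩; exact ⟨by omega, h'⟩
    · rintro ⟨h, h'⟩; exact ⟨by omega, h'⟩
  rw [candN]
  by_cases h1 : 0 < k ∧ A.getD (k - 1) 0 ≤ A.getD k 0 * X <;>
    by_cases h2 : k + 1 < N.toNat ∧ A.getD k 0 * X ≤ A.getD (k + 1) 0
  · have ek1 : ((k : Int) - 1) = ((k - 1 : Nat) : Int) := by
      have := h1.1; omega
    rw [if_pos (hc1.mpr h1), if_pos (hc2.mpr h2), if_pos h1, if_pos h2, ek1, ek2]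
    simp only [PySem.List.pyGetD_natCast]
    rw [PySem.List.getD_map_range _ _ _ _ (by omega),
      PySem.List.getD_map_range _ _ _ _ h2.1]
    push_cast
    ring
  · have ek1 : ((k : Int) - 1) = ((k - 1 : Nat) : Int) := by
      have := h1.1; omega
    rw [if_pos (hc1.mpr h1), if_neg (fun hraw => h2 (hc2.mp hraw)), if_pos h1,
      if_neg h2, ek1]
    simp only [PySem.List.pyGetD_natCast]
    rw [PySem.List.getD_map_range _ _ _ _ (by omega)]
    push_cast
    ring
  · rw [if_neg (fun hraw => h1 (hc1.mp hraw)), if_pos (hc2.mpr h2), if_neg h1,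
      if_pos h2, ek2]
    simp only [PySem.List.pyGetD_natCast]
    rw [PySem.List.getD_map_range _ _ _ _ h2.1]
    push_cast
    ring
  · rw [if_neg (fun hraw => h1 (hc1.mp hraw)), if_neg (fun hraw => h2 (hc2.mp hraw)),
      if_neg h1, if_neg h2]
    push_cast

-- ===== VERDICT (by name: the statement is the Claim_ definition above) =====
theorem findMaxStreak_spec : Claim_equal_findMaxStreak := by
  intro N X A _ hPre
  unfold Spec_findMaxStreak
  have hPre' : N ≤ (A.length : Int) := hPre
  by_cases hN : N ≤ 0
  · unfold findMaxStreak findMaxStreak_alt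
    rw [if_pos hN]
    simp [PySem.List.pyRange_one_eq_nil (show (N : Int) ≤ 1 by omega),
      PySem.List.pyRange_one_eq_nil (show (N : Int) ≤ 0 from hN)]
  · push_neg at hN
    rw [portA_eq N X A hN hPre', portB_eq N X A hN]
    apply fold_max_eq
    · intro k hk
      have hkn : k < N.toNat := List.mem_range.mp hk
      have h := key_lemma (fun j => A.getD j 0) X hkn
      have h' := congrArg (fun z : Nat => (z : Int)) h
      simpa [Nat.cast_max] using h'
    · exact le_refl _
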